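-- pv_equiv track=rewrite | github.com/ITT-21SS-UR/assignment-5-text-entry-lm | text_entry_speed_test.py | get_balanced_condition_list
-- ===== SOURCE A (Python) =====
-- def get_balanced_condition_list(condition_list, participant_id):
--     condition_count = len(condition_list)
--
--     # First we need to create a balanced latin square according to our number of conditions:
--     # see https://medium.com/@graycoding/balanced-latin-squares-in-python-2c3aa6ec95b9
--     balanced_order = [[((j // 2 + 1 if j % 2 else condition_count - j // 2) + i) % condition_count + 1 for j in
--                        range(condition_count)] for i in range(condition_count)]
--     if condition_count % 2:  # Repeat reversed for odd n
--         balanced_order += [seq[::-1] for seq in balanced_order]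
--
--     order_for_participant = balanced_order[participant_id % condition_count]  # get trial order for current participant
--
--     # Now we will reorder our conditions-list with the balanced-latin-square order we created above
--     # see https://stackoverflow.com/questions/2177590/how-can-i-reorder-a-list/2177607
--     for i in range(len(order_for_participant)):
--         order_for_participant[i] -= 1  # we have to subtract 1 before to prevent an IndexOutOfRange-Error
--     return [condition_list[i] for i in order_for_participant]
-- ===== SOURCE B (Python) =====
-- def get_balanced_condition_list(condition_list, participant_id):
--     # Faster: compute only the single Latin-square row needed, O(n) instead of O(n^2).
--     n = len(condition_list)
--     r = participant_id % n
--     return [condition_list[((j // 2 + 1 if j % 2 else n - j // 2) + r) % n]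
--             for j in range(n)]
-- ===== Notes on version B (the rewrite author's own statement) =====
-- stated objective: faster
-- what changed: B computes only the single Latin-square row for the participant directly from the closed-form entry formula instead of materialising the whole n x n (or 2n x n) balanced square, picking a row and post-decrementing it.
import Mathlib
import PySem

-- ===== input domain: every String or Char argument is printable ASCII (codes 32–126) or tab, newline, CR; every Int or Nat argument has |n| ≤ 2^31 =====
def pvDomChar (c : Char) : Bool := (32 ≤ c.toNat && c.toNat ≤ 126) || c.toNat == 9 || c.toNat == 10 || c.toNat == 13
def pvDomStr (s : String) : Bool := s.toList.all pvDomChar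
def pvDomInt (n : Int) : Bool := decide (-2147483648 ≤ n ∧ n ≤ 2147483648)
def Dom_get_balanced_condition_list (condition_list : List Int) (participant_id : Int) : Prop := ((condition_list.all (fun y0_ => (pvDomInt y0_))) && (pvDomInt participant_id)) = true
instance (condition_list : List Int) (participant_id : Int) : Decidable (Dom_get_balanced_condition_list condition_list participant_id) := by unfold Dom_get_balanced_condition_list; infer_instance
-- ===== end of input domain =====

-- B computes only the one Latin-square row the participant needs (O(n) instead of building the whole O(n^2) square).

-- ===== PORT A =====
def get_balanced_condition_list (condition_list : List Int) (participant_id : Int) : List Int :=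
  let condition_count : Int := PySem.List.len condition_list
  -- balanced_order = [[((j//2+1 if j%2 else n-j//2)+i) % n + 1 for j in range(n)] for i in range(n)]
  let balanced_order : List (List Int) :=
    (PySem.List.pyRange 0 condition_count 1).map (fun i =>
      (PySem.List.pyRange 0 condition_count 1).map (fun j =>
        PySem.Int.mod ((if PySem.Int.mod j 2 ≠ 0 then PySem.Int.floordiv j 2 + 1
                        else condition_count - PySem.Int.floordiv j 2) + i) condition_count + 1))
  -- if n % 2: balanced_order += [seq[::-1] for seq in balanced_order]   (seq[::-1] = reverse, exact)
  let balanced_order : List (List Int) :=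
    if PySem.Int.mod condition_count 2 ≠ 0 then
      balanced_order ++ balanced_order.map (fun seq => seq.reverse)
    else balanced_order
  -- order_for_participant = balanced_order[participant_id % condition_count]
  let order_for_participant : List Int :=
    PySem.List.pyGetD balanced_order (PySem.Int.mod participant_id condition_count) []
  -- for i in range(len(order)): order[i] -= 1  (in-place elementwise decrement)
  let order_for_participant := order_for_participant.map (fun x => x - 1)
  -- return [condition_list[i] for i in order_for_participant]
  order_for_participant.map (fun i => PySem.List.pyGetD condition_list i 0)

-- ===== PORT B =====
def get_balanced_condition_list_alt (condition_list : List Int) (participant_id : Int) : List Int :=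
  let n : Int := PySem.List.len condition_list
  let r : Int := PySem.Int.mod participant_id n
  (PySem.List.pyRange 0 n 1).map (fun j =>
    PySem.List.pyGetD condition_list
      (PySem.Int.mod ((if PySem.Int.mod j 2 ≠ 0 then PySem.Int.floordiv j 2 + 1
                       else n - PySem.Int.floordiv j 2) + r) n) 0)

-- ===== PRECONDITION & SPEC =====
-- A raises ZeroDivisionError on the empty list (participant_id % 0); excluded.
def Pre_get_balanced_condition_list (condition_list : List Int) (participant_id : Int) : Prop :=
  condition_list ≠ []
instance (condition_list : List Int) (participant_id : Int) : Decidable (Pre_get_balanced_condition_list condition_list participant_id) := by unfold Pre_get_balanced_condition_list; infer_instance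
def pvWitness_get_balanced_condition_list : List Int × Int := ([10, 20, 30], 4)
def Spec_get_balanced_condition_list (condition_list : List Int) (participant_id : Int) (out : List Int) : Prop := out = get_balanced_condition_list_alt condition_list participant_id
instance (condition_list : List Int) (participant_id : Int) (out : List Int) : Decidable (Spec_get_balanced_condition_list condition_list participant_id out) := by unfold Spec_get_balanced_condition_list; infer_instance

-- ===== CLAIM (what is proved, stated in full; the proofs are below) =====
def Claim_equal_get_balanced_condition_list : Prop := ∀ (condition_list : List Int) (participant_id : Int), Dom_get_balanced_condition_list condition_list participant_id → Pre_get_balanced_condition_list condition_list participant_id → Spec_get_balanced_condition_list condition_list participant_id (get_balanced_condition_list condition_list participant_id)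

-- ===== LEMMAS AND PROOFS =====

-- the selected row of the (possibly doubled) square is the direct formula row
lemma row_select (cl : List Int) (pid : Int) (h : cl ≠ []) :
    get_balanced_condition_list cl pid = get_balanced_condition_list_alt cl pid := by
  unfold get_balanced_condition_list get_balanced_condition_list_alt
  simp only [PySem.List.len_eq]
  set n : Int := (cl.length : Int) with hn_def
  have hn : 0 < n := by have := List.length_pos_iff.mpr h; omega
  set r : Int := PySem.Int.mod pid n with hr_def
  have hr0 : 0 ≤ r := PySem.Int.mod_nonneg pid hn
  have hrn : r < n := PySem.Int.mod_lt pid hn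
  set inner : Int → List Int := fun i =>
    (PySem.List.pyRange 0 n 1).map (fun j =>
      PySem.Int.mod ((if PySem.Int.mod j 2 ≠ 0 then PySem.Int.floordiv j 2 + 1
                      else n - PySem.Int.floordiv j 2) + i) n + 1) with hinner
  -- in either parity the selected row of the square is the direct formula row `inner r`
  have key : ∀ (bo : List (List Int)),
      (bo = (PySem.List.pyRange 0 n 1).map inner ∨
       bo = (PySem.List.pyRange 0 n 1).map inner ++
            ((PySem.List.pyRange 0 n 1).map inner).map (fun seq => seq.reverse)) →
      PySem.List.pyGetD bo r [] = inner r := by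
    rintro bo (rfl | rfl)
    · exact PySem.List.pyGetD_map_pyRange_of_nonneg inner n r [] hr0 hrn
    · have hlen : r < (((PySem.List.pyRange 0 n 1).map inner ++
          ((PySem.List.pyRange 0 n 1).map inner).map (fun seq => seq.reverse)).length : Int) := by
        simp [PySem.List.length_pyRange_one]; omega
      rw [PySem.List.pyGetD_eq_getElem _ [] hr0 hlen]
      rw [List.getElem_append_left (by simp [PySem.List.length_pyRange_one]; omega)]
      rw [List.getElem_map, PySem.List.getElem_pyRange_one]
      congr 1
      omega
  split_ifs with hpar
  · rw [key _ (Or.inr rfl), hinner]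
    simp [List.map_map, Function.comp]
  · rw [key _ (Or.inl rfl), hinner]
    simp [List.map_map, Function.comp]

-- ===== VERDICT (by name: the statement is the Claim_ definition above) =====
theorem get_balanced_condition_list_spec : Claim_equal_get_balanced_condition_list := by
  intro cl pid _ hpre
  exact row_select cl pid hpre
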